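-- pv_equiv track=rewrite | github.com/Rocla/banana-musicator | music-generator/music_generator.py | comp_pattern_generator_happy5
-- ===== SOURCE A (Python) =====
-- def comp_pattern_generator_happy5(iterable):
--     """ Converts a list of MIDI notes to (length, notes) tuples in a rock pattern. """
--     for chord in iterable:
--         yield (200, chord[0:2])
--         yield (200, chord[0:1])
--         yield (200, chord[0:3])
--         yield (200, chord[0:2])
--         yield (200, chord[0:3])
--         yield (200, chord)
-- ===== SOURCE B (Python) =====
-- def comp_pattern_generator_happy5(iterable):
--     """ Converts a list of MIDI notes to (length, notes) tuples in a rock pattern. """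
--     def build(chords):
--         # recursive, back-to-front; prefixes grown incrementally instead of sliced independently
--         if not chords:
--             return []
--         chord = chords[0]
--         p1 = chord[0:1]
--         p2 = p1 + chord[1:2]
--         p3 = p2 + chord[2:3]
--         return [(200, p2), (200, p1), (200, p3), (200, p2), (200, p3), (200, chord)] + build(chords[1:])
--     yield from build(list(iterable))
-- ===== Notes on version B (the rewrite author's own statement) =====
-- stated objective: alternative
-- what changed: Replaced the per-chord sequence of independent slices with a recursive back-to-front builder that grows the three prefixes incrementally (p1, p2 = p1+next, p3 = p2+next) and concatenates each chord's block onto the recursion's result.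
import Mathlib
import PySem

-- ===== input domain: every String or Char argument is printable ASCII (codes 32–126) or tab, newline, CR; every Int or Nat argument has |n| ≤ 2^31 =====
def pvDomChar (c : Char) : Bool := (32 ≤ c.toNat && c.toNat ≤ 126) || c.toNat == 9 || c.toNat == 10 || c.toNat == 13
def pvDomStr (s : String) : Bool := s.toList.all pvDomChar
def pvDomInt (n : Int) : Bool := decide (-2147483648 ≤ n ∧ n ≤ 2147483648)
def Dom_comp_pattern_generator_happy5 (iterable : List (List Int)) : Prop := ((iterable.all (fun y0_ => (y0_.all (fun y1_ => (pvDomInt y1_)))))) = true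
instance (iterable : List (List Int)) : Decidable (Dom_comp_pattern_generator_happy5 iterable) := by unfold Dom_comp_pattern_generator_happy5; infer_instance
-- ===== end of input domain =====

-- ===== PORT A =====
-- B rebuilds the stream recursively back-to-front, growing the three prefixes incrementally
-- instead of slicing each independently (objective: alternative decomposition).
def comp_pattern_generator_happy5 (iterable : List (List Int)) : List (Int × List Int) :=
  iterable.flatMap (fun chord =>
    [ (200, PySem.List.slice chord (some 0) (some 2)),
      (200, PySem.List.slice chord (some 0) (some 1)),
      (200, PySem.List.slice chord (some 0) (some 3)),
      (200, PySem.List.slice chord (some 0) (some 2)),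
      (200, PySem.List.slice chord (some 0) (some 3)),
      (200, chord) ])

-- ===== PORT B =====
def pvBuild : List (List Int) → List (Int × List Int)
  | [] => []
  | chord :: rest =>
    let p1 := PySem.List.slice chord (some 0) (some 1)
    let p2 := p1 ++ PySem.List.slice chord (some 1) (some 2)
    let p3 := p2 ++ PySem.List.slice chord (some 2) (some 3)
    [(200, p2), (200, p1), (200, p3), (200, p2), (200, p3), (200, chord)] ++ pvBuild rest

def comp_pattern_generator_happy5_alt (iterable : List (List Int)) : List (Int × List Int) :=
  pvBuild iterable

-- ===== PRECONDITION & SPEC =====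
def Spec_comp_pattern_generator_happy5 (iterable : List (List Int)) (out : List (Int × List Int)) : Prop := out = comp_pattern_generator_happy5_alt iterable
instance (iterable : List (List Int)) (out : List (Int × List Int)) : Decidable (Spec_comp_pattern_generator_happy5 iterable out) := by unfold Spec_comp_pattern_generator_happy5; infer_instance

-- ===== CLAIM =====
def Claim_equal_comp_pattern_generator_happy5 : Prop := ∀ (iterable : List (List Int)), Dom_comp_pattern_generator_happy5 iterable → Spec_comp_pattern_generator_happy5 iterable (comp_pattern_generator_happy5 iterable)

-- ===== LEMMAS AND PROOFS =====
-- take a ++ one more element = take (a+1)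
theorem pv_take_glue (chord : List Int) (a : Nat) :
    chord.take a ++ (chord.drop a).take 1 = chord.take (a + 1) := by
  induction a generalizing chord with
  | zero => cases chord <;> simp
  | succ n ih => cases chord with
    | nil => simp
    | cons x xs => simp [List.take_succ_cons, ih xs]

theorem pvBuild_eq (iterable : List (List Int)) :
    pvBuild iterable = comp_pattern_generator_happy5 iterable := by
  induction iterable with
  | nil => rfl
  | cons chord rest ih =>
    show _ ++ pvBuild rest = _
    rw [ih]
    unfold comp_pattern_generator_happy5
    rw [List.flatMap_cons]
    congr 1
    have h1 : PySem.List.slice chord (some (0:Int)) (some (1:Int)) = chord.take 1 := by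
      simpa using PySem.List.slice_natCast chord 0 1
    have h2 : PySem.List.slice chord (some (1:Int)) (some (2:Int)) = (chord.drop 1).take 1 := by
      simpa using PySem.List.slice_natCast chord 1 2
    have h3 : PySem.List.slice chord (some (2:Int)) (some (3:Int)) = (chord.drop 2).take 1 := by
      simpa using PySem.List.slice_natCast chord 2 3
    have g2 : chord.take 1 ++ (chord.drop 1).take 1 = chord.take 2 := pv_take_glue chord 1
    have g3 : chord.take 2 ++ (chord.drop 2).take 1 = chord.take 3 := pv_take_glue chord 2
    have s02 : PySem.List.slice chord (some (0:Int)) (some (2:Int)) = chord.take 2 := by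
      simpa using PySem.List.slice_natCast chord 0 2
    have s03 : PySem.List.slice chord (some (0:Int)) (some (3:Int)) = chord.take 3 := by
      simpa using PySem.List.slice_natCast chord 0 3
    simp only [h1, h2, h3, g2, g3, s02, s03]

-- ===== VERDICT =====
theorem comp_pattern_generator_happy5_spec : Claim_equal_comp_pattern_generator_happy5 := by
  intro iterable _
  unfold Spec_comp_pattern_generator_happy5 comp_pattern_generator_happy5_alt
  exact (pvBuild_eq iterable).symm
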